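-- pv_equiv track=rewrite | github.com/shekharlab/SpatialRGC | spatial_rgc/imaging_scripts/parallel_stitch.py | _partitionIndexes
-- ===== SOURCE A (Python) =====
-- def _partitionIndexes(totalsize, numberofpartitions):
--     # Compute the chunk size (integer division)
--     chunksize = totalsize // numberofpartitions
--     # How many chunks need an extra 1 added to the size?
--     remainder = totalsize - chunksize * numberofpartitions
--     a = 0
--     for i in range(numberofpartitions):
--         b = a + chunksize + (i < remainder)
--         # Yield the inclusive-inclusive range
--         yield (a, b - 1)
--         a = b
-- ===== SOURCE B (Python) =====
-- def _partitionIndexes(totalsize, numberofpartitions):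
--     # Compute chunk size and remainder, then emit each inclusive range in
--     # closed form from its index, with no running accumulator.
--     chunksize = totalsize // numberofpartitions
--     remainder = totalsize - chunksize * numberofpartitions
--     for i in range(numberofpartitions):
--         yield (i * chunksize + min(i, remainder),
--                (i + 1) * chunksize + min(i + 1, remainder) - 1)
-- ===== Notes on version B (the rewrite author's own statement) =====
-- stated objective: alternative
-- what changed: Each partition's inclusive (start, end) pair is computed in closed form from its index i (start = i*chunksize + min(i, remainder)) instead of being threaded through a running accumulator from the previous iteration.
import Mathlib
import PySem

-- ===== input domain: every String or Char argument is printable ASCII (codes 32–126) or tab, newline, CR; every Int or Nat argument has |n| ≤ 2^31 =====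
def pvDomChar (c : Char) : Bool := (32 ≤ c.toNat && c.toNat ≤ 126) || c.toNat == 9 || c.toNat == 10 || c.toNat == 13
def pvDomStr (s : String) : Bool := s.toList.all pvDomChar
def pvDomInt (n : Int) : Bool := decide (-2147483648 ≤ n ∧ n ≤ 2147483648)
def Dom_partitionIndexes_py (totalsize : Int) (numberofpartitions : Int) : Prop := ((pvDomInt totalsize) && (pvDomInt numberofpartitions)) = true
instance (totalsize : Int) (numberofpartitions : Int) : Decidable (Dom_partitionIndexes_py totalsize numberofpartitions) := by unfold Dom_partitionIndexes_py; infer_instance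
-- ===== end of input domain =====

-- B replaces A's running accumulator by a closed-form (start, end) pair computed
-- independently from each index i; same cost, different decomposition.
-- Both Pythons are generators; the equivalence is about the list of yielded values.

-- ===== PORT A =====
-- loop body of A: b = a + chunksize + (i < remainder); yield (a, b-1); a = b
def pvStepA (c r : Int) (st : Int × List (Int × Int)) (j : Int) : Int × List (Int × Int) :=
  let b := st.1 + c + (if j < r then (1 : Int) else 0)
  (b, st.2 ++ [(st.1, b - 1)])

def partitionIndexes_py (totalsize : Int) (numberofpartitions : Int) : List (Int × Int) :=
  let chunksize := PySem.Int.floordiv totalsize numberofpartitions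
  let remainder := totalsize - chunksize * numberofpartitions
  ((PySem.List.pyRange 0 numberofpartitions 1).foldl (pvStepA chunksize remainder) (0, [])).2

-- ===== PORT B =====
def partitionIndexes_py_alt (totalsize : Int) (numberofpartitions : Int) : List (Int × Int) :=
  let chunksize := PySem.Int.floordiv totalsize numberofpartitions
  let remainder := totalsize - chunksize * numberofpartitions
  (PySem.List.pyRange 0 numberofpartitions 1).map
    (fun i => (i * chunksize + min i remainder,
               (i + 1) * chunksize + min (i + 1) remainder - 1))

-- ===== PRECONDITION & SPEC =====
-- Pre_ excludes exactly numberofpartitions = 0, where both Pythons raise ZeroDivisionError.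
def Pre_partitionIndexes_py (totalsize : Int) (numberofpartitions : Int) : Prop :=
  numberofpartitions ≠ 0
instance (totalsize : Int) (numberofpartitions : Int) : Decidable (Pre_partitionIndexes_py totalsize numberofpartitions) := by unfold Pre_partitionIndexes_py; infer_instance
def pvWitness_partitionIndexes_py : Int × Int := (10, 3)

def Spec_partitionIndexes_py (totalsize : Int) (numberofpartitions : Int) (out : List (Int × Int)) : Prop := out = partitionIndexes_py_alt totalsize numberofpartitions
instance (totalsize : Int) (numberofpartitions : Int) (out : List (Int × Int)) : Decidable (Spec_partitionIndexes_py totalsize numberofpartitions out) := by unfold Spec_partitionIndexes_py; infer_instance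

-- ===== CLAIM (what is proved, stated in full; the proofs are below) =====
def Claim_equal_partitionIndexes_py : Prop := ∀ (totalsize : Int) (numberofpartitions : Int), Dom_partitionIndexes_py totalsize numberofpartitions → Pre_partitionIndexes_py totalsize numberofpartitions → Spec_partitionIndexes_py totalsize numberofpartitions (partitionIndexes_py totalsize numberofpartitions)

-- ===== LEMMAS AND PROOFS =====

-- Loop invariant: when A's loop reaches index i its accumulator equals
-- i*c + min i r; then folding over range(i, i+k) appends exactly B's closed-form pairs.
theorem pv_fold_eq_map (c r : Int) (k : Nat) : ∀ (i a : Int) (acc : List (Int × Int)),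
    a = i * c + min i r →
    ((PySem.List.pyRange i (i + k) 1).foldl (pvStepA c r) (a, acc)).2
    = acc ++ (PySem.List.pyRange i (i + k) 1).map
        (fun j => (j * c + min j r, (j + 1) * c + min (j + 1) r - 1)) := by
  induction k with
  | zero =>
    intro i a acc _
    rw [PySem.List.pyRange_one_eq_nil (by omega : i + ((0 : Nat) : Int) ≤ i)]
    simp
  | succ k ih =>
    intro i a acc ha
    have hcons : PySem.List.pyRange i (i + ((k + 1 : Nat) : Int)) 1
        = i :: PySem.List.pyRange (i + 1) (i + ((k + 1 : Nat) : Int)) 1 :=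
      PySem.List.pyRange_one_cons (by push_cast; omega)
    have hmin : min (i + 1) r = min i r + (if i < r then (1 : Int) else 0) := by
      split_ifs with h <;> omega
    have hb : pvStepA c r (a, acc) i
        = ((i + 1) * c + min (i + 1) r,
           acc ++ [(i * c + min i r, (i + 1) * c + min (i + 1) r - 1)]) := by
      have h1 : i * c + min i r + c + (if i < r then (1 : Int) else 0)
          = (i + 1) * c + (min i r + (if i < r then (1 : Int) else 0)) := by ring
      simp only [pvStepA, ha, hmin]
      rw [Prod.mk.injEq]
      exact ⟨h1, by rw [h1]⟩
    have hrange : i + ((k + 1 : Nat) : Int) = (i + 1) + ((k : Nat) : Int) := by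
      push_cast; ring
    rw [hcons, List.foldl_cons, hb, hrange,
        ih (i + 1) _ _ rfl, List.map_cons]
    simp [List.append_assoc]

-- For a positive partition count and nonnegative remainder the whole fold
-- equals B's map (instantiate the invariant at i = 0, a = 0).
theorem pv_pos (c r n : Int) (hp : 0 < n) (hr : 0 ≤ r) :
    ((PySem.List.pyRange 0 n 1).foldl (pvStepA c r) (0, [])).2
    = (PySem.List.pyRange 0 n 1).map
        (fun j => (j * c + min j r, (j + 1) * c + min (j + 1) r - 1)) := by
  have hk : n = 0 + ((n.toNat : Nat) : Int) := by omega
  rw [hk, pv_fold_eq_map c r n.toNat 0 0 [] (by omega)]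
  simp

-- ===== VERDICT (by name: the statement is the Claim_ definition above) =====
theorem partitionIndexes_py_spec : Claim_equal_partitionIndexes_py := by
  intro t n _ hn
  unfold Spec_partitionIndexes_py partitionIndexes_py partitionIndexes_py_alt
  by_cases hp : 0 < n
  · have hr : 0 ≤ t - PySem.Int.floordiv t n * n := by
      have h1 := PySem.Int.floordiv_mul_add_mod t n
      have h2 : PySem.Int.mod t n = t % n := PySem.Int.mod_eq_emod_of_pos hp
      have h3 := Int.emod_nonneg t (by omega : n ≠ 0)
      omega
    exact pv_pos _ _ n hp hr
  · have hnil : PySem.List.pyRange 0 n 1 = [] :=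
      PySem.List.pyRange_one_eq_nil (by omega)
    simp [hnil]
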